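-- pv_equiv track=rewrite | github.com/DozzzeN/SKG | gl/test_word.py | find_second_last_period
-- ===== SOURCE A (Python) =====
-- def find_second_last_period(string):
--     # 找到倒数第二个句号的位置
--     second_last_period_index = -1
--     last_period_index = -1
--
--     for i, char in enumerate(string):
--         if char == '.':
--             second_last_period_index = last_period_index
--             last_period_index = i
--
--     return second_last_period_index
-- ===== SOURCE B (Python) =====
-- def find_second_last_period(string):
--     last = string.rfind('.')
--     if last == -1:
--         return -1
--     return string.rfind('.', 0, last)
-- ===== Notes on version B (the rewrite author's own statement) =====
-- stated objective: idiomatic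
-- what changed: Replaces the forward enumerate loop tracking two accumulator variables with two backward str.rfind library searches (last period, then the last period strictly before it).
import Mathlib
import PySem

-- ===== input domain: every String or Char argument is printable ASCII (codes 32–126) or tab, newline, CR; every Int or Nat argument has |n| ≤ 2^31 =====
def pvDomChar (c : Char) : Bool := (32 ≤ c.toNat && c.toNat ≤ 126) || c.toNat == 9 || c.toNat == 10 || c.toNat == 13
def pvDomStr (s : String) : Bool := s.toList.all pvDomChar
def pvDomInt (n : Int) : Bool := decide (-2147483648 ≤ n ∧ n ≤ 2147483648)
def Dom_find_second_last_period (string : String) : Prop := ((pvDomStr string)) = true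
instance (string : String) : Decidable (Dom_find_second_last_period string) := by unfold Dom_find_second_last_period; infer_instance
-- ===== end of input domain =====

-- B replaces the forward enumerate loop tracking two accumulators with two backward rfind searches (idiomatic).


-- ===== PORT A =====
def find_second_last_period (string : String) : Int :=
  let p := (PySem.List.enumerate string.toList 0).foldl
    (fun (st : Int × Int) ic => if ic.2 = '.' then (st.2, ic.1) else st) (-1, -1)
  p.1

-- ===== PORT B =====
def find_second_last_period_alt (string : String) : Int :=
  let last := PySem.Str.rfind string "."
  if last = -1 then -1 else PySem.Str.rfindFrom string "." 0 (some last)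

-- ===== PRECONDITION & SPEC =====
def Spec_find_second_last_period (string : String) (out : Int) : Prop := out = find_second_last_period_alt string
instance (string : String) (out : Int) : Decidable (Spec_find_second_last_period string out) := by unfold Spec_find_second_last_period; infer_instance

-- ===== CLAIM (what is proved, stated in full; the proofs are below) =====
def Claim_equal_find_second_last_period : Prop := ∀ (string : String), Dom_find_second_last_period string → Spec_find_second_last_period string (find_second_last_period string)

-- ===== LEMMAS AND PROOFS =====

theorem pv_go_ge (s sub : List Char) (j : Nat) : -1 ≤ PySem.Chars.rfind.go s sub j := by
  induction j with
  | zero => simp [PySem.Chars.rfind.go]; split <;> omega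
  | succ j ih => simp [PySem.Chars.rfind.go]; split <;> omega

theorem pv_go_le (s sub : List Char) (j : Nat) : PySem.Chars.rfind.go s sub j ≤ j := by
  induction j with
  | zero => simp [PySem.Chars.rfind.go]; split <;> omega
  | succ j ih =>
    simp [PySem.Chars.rfind.go]
    split
    · omega
    · exact le_trans ih (by omega)

theorem pv_rfind_ge (l : List Char) : -1 ≤ PySem.Chars.rfind l ['.'] := pv_go_ge _ _ _

theorem pv_rfind_le (l : List Char) : PySem.Chars.rfind l ['.'] ≤ l.length := pv_go_le _ _ _

theorem pv_prefix_single (c : Char) (xs : List Char) :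
    [c].isPrefixOf xs = match xs with | [] => false | y :: _ => c == y := by
  cases xs <;> simp [List.isPrefixOf]

theorem pv_go_append_ne (l : List Char) (c : Char) (hc : c ≠ '.') :
    ∀ j, j ≤ l.length → PySem.Chars.rfind.go (l ++ [c]) ['.'] j = PySem.Chars.rfind.go l ['.'] j := by
  intro j
  induction j with
  | zero =>
    intro _
    simp [PySem.Chars.rfind.go, pv_prefix_single]
    cases l with
    | nil => simp [Ne.symm hc]
    | cons y ys => simp
  | succ j ih =>
    intro hj
    have hj' : j ≤ l.length := by omega
    by_cases hlt : j + 1 < l.length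
    · have hdrop : (l ++ [c]).drop (j + 1) = l.drop (j + 1) ++ [c] :=
        List.drop_append_of_le_length (by omega)
      have hne : l.drop (j + 1) ≠ [] := by
        intro h; have := List.length_drop (l := l) (i := j + 1); rw [h] at this; simp at this; omega
      obtain ⟨y, ys, hys⟩ := List.exists_cons_of_ne_nil hne
      simp [PySem.Chars.rfind.go, hdrop, hys, pv_prefix_single, ih hj']
    · have hj1 : j + 1 = l.length := by omega
      have hdrop : (l ++ [c]).drop (j + 1) = [c] := by
        rw [List.drop_append_of_le_length (by omega), hj1]; simp
      have hdrop2 : l.drop (j + 1) = [] := by rw [hj1]; simp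
      simp [PySem.Chars.rfind.go, hdrop, hdrop2, pv_prefix_single, Ne.symm hc, ih hj']

theorem pv_go_succ (s sub : List Char) (j : Nat) :
    PySem.Chars.rfind.go s sub (j + 1)
      = if sub.isPrefixOf (s.drop (j + 1)) then ((j : Int) + 1) else PySem.Chars.rfind.go s sub j := by
  simp [PySem.Chars.rfind.go]

theorem pv_go_zero (s sub : List Char) :
    PySem.Chars.rfind.go s sub 0 = if sub.isPrefixOf s then 0 else -1 := by
  simp [PySem.Chars.rfind.go]

theorem pv_rfind_append (l : List Char) (c : Char) :
    PySem.Chars.rfind (l ++ [c]) ['.'] =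
      if c = '.' then (l.length : Int) else PySem.Chars.rfind l ['.'] := by
  unfold PySem.Chars.rfind
  rw [show (l ++ [c]).length = l.length + 1 by simp]
  rw [pv_go_succ]
  have hdropTop : (l ++ [c]).drop (l.length + 1) = [] :=
    List.drop_eq_nil_of_le (by simp)
  have hdropN : (l ++ [c]).drop l.length = [c] := by
    rw [List.drop_append_of_le_length (by omega)]; simp
  rw [hdropTop]
  simp only [List.isPrefixOf, Bool.false_eq_true, if_false]
  cases hL : l.length with
  | zero =>
    have hl : l = [] := List.eq_nil_of_length_eq_zero hL
    subst hl
    by_cases hc : c = '.' <;>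
      simp [pv_go_zero, List.isPrefixOf, hc, Ne.symm]
  | succ m =>
    rw [pv_go_succ]
    rw [show m + 1 = l.length from hL.symm, hdropN]
    by_cases hc : c = '.'
    · simp [hc, List.isPrefixOf, hL]
    · have hpre : ['.'].isPrefixOf [c] = false := by
        simp [List.isPrefixOf]; exact Ne.symm hc
      rw [hpre]
      simp only [Bool.false_eq_true, if_false, if_neg hc]
      have h1 : PySem.Chars.rfind.go (l ++ [c]) ['.'] m = PySem.Chars.rfind.go l ['.'] m :=
        pv_go_append_ne l c hc m (by omega)
      rw [h1, hL, pv_go_succ]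
      rw [show m + 1 = l.length from hL.symm]
      simp [List.isPrefixOf]

-- A's fold, characterised: second component = rfind, first = rfind of the prefix before it.
theorem pv_fold_char (l : List Char) :
    (PySem.List.enumerate l 0).foldl
      (fun (st : Int × Int) ic => if ic.2 = '.' then (st.2, ic.1) else st) (-1, -1) =
    (if PySem.Chars.rfind l ['.'] = -1 then -1
       else PySem.Chars.rfind (l.take (PySem.Chars.rfind l ['.']).toNat) ['.'],
     PySem.Chars.rfind l ['.']) := by
  induction l using List.reverseRecOn with
  | nil => simp [PySem.List.enumerate, PySem.Chars.rfind, PySem.Chars.rfind.go, pv_prefix_single]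
  | append_singleton l c ih =>
    rw [PySem.List.enumerate_append, List.foldl_append, ih, pv_rfind_append]
    simp only [PySem.List.enumerate, List.foldl]
    by_cases hc : c = '.'
    · subst hc
      simp only [if_pos rfl]
      have hne : (l.length : Int) ≠ -1 := by omega
      have htake : (l ++ ['.']).take ((l.length : Int)).toNat = l := by simp
      simp [hne, htake]
    · simp only [if_neg hc]
      by_cases h1 : PySem.Chars.rfind l ['.'] = -1
      · simp [h1, hc]
      · have hle := pv_rfind_le l
        have hge := pv_rfind_ge l
        have htake : (l ++ [c]).take (PySem.Chars.rfind l ['.']).toNat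
            = l.take (PySem.Chars.rfind l ['.']).toNat := by
          rw [List.take_append_of_le_length (by omega)]
        simp [h1, hc, htake]

-- ===== VERDICT (by name: the statement is the Claim_ definition above) =====
theorem find_second_last_period_spec : Claim_equal_find_second_last_period := by
  intro s _
  unfold Spec_find_second_last_period find_second_last_period find_second_last_period_alt
  rw [pv_fold_char]
  simp only [PySem.Str.rfind_eq, PySem.Str.rfindFrom_eq]
  have hdot : (".").toList = ['.'] := rfl
  rw [hdot]
  set l := s.toList with hl
  by_cases h1 : PySem.Chars.rfind l ['.'] = -1
  · simp [h1]
  · have hle := pv_rfind_le l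
    have hge := pv_rfind_ge l
    simp only [if_neg h1]
    unfold PySem.Chars.rfindFrom
    have hnl : ¬ ((l.length : Int) < PySem.Chars.rfind l ['.']) := by omega
    have hnn : ¬ (PySem.Chars.rfind l ['.'] < 0) := by omega
    simp only [hnl, if_false]
    norm_num
    rw [if_neg hnn]
    by_cases h2 : PySem.Chars.rfind (l.take (PySem.Chars.rfind l ['.']).toNat) ['.'] = -1
    · simp [h2]
    · rw [if_neg h2, if_neg hnn]
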